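-- pv_equiv track=rewrite | github.com/Nemepher/Prepa | Python/TP6.py | nombre_mots
-- ===== SOURCE A (Python) =====
-- def nombre_mots(M):
--     state=0
--     p=0
--     c=0
--     for p in M:
--         if p in [" " , "," , ";" , "'" , "-" , "." , "!" , "?"]:
--             state=0
--         elif state==0:
--             state=1
--             c+=1
--     return c
-- ===== SOURCE B (Python) =====
-- def nombre_mots(M):
--     delims = frozenset(" ,;'-.!?")
--     normalized = ''.join(' ' if c in delims else c for c in M)
--     return sum(1 for part in normalized.split(' ') if part)
-- ===== Notes on version B (the rewrite author's own statement) =====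
-- stated objective: faster
-- what changed: Replaces the per-character state-machine flag with staged passes: normalize every delimiter to a space, split the string on spaces, and count the nonempty parts.
import Mathlib
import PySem

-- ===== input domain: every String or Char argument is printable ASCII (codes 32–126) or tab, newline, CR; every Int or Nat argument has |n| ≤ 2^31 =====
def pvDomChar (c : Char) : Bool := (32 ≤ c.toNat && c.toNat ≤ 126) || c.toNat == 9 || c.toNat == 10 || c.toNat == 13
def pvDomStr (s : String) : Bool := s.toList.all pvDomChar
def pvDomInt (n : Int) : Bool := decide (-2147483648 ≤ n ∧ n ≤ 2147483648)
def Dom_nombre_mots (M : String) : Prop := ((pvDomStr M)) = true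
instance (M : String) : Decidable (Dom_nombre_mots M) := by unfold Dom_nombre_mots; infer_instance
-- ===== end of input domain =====

-- B replaces A's one-pass state-machine flag by staged passes: normalize every
-- delimiter to a space, split on spaces, count the nonempty parts (objective: alternative).

-- ===== PORT A =====
-- A: state machine — state=0 after a delimiter, count +1 on entering a word.
def pvStepA (st : Int × Int) (p : Char) : Int × Int :=
  if p ∈ [' ', ',', ';', '\'', '-', '.', '!', '?'] then (0, st.2)
  else if st.1 = 0 then (1, st.2 + 1)
  else st

def nombre_mots (M : String) : Int :=
  (M.toList.foldl pvStepA (0, 0)).2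

-- ===== PORT B =====
-- 'c in delims' (frozenset membership)
def pvIsDelim (p : Char) : Bool := p ∈ [' ', ',', ';', '\'', '-', '.', '!', '?']

-- normalized.split(' ') keeps empty parts, exactly List.splitOn ' '; 'if part' = nonempty
def nombre_mots_alt (M : String) : Int :=
  let normalized := M.toList.map (fun c => if pvIsDelim c then ' ' else c)
  (((normalized.splitOn ' ').filter (fun part => !part.isEmpty)).length : Int)

-- ===== PRECONDITION & SPEC =====
def Spec_nombre_mots (M : String) (out : Int) : Prop := out = nombre_mots_alt M
instance (M : String) (out : Int) : Decidable (Spec_nombre_mots M out) := by unfold Spec_nombre_mots; infer_instance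

-- ===== CLAIM (what is proved, stated in full; the proofs are below) =====
def Claim_equal_nombre_mots : Prop := ∀ (M : String), Dom_nombre_mots M → Spec_nombre_mots M (nombre_mots M)

-- ===== LEMMAS AND PROOFS =====

-- nonempty-part count of the split, and the same ignoring the first part
def pvG (l : List Char) : Nat := ((l.splitOn ' ').filter (fun part => !part.isEmpty)).length
def pvT (l : List Char) : Nat := (((l.splitOn ' ').tail).filter (fun part => !part.isEmpty)).length

theorem pvG_nil : pvG [] = 0 := by decide
theorem pvT_nil : pvT [] = 0 := by decide

theorem pv_split_cons (a : Char) (l : List Char) :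
    (a :: l).splitOn ' ' =
      if a = ' ' then [] :: l.splitOn ' ' else (l.splitOn ' ').modifyHead (List.cons a) := by
  simp [List.splitOn, List.splitOnP_cons]

theorem pvG_cons_space (l : List Char) : pvG (' ' :: l) = pvG l := by
  simp [pvG, pv_split_cons]

theorem pvT_cons_space (l : List Char) : pvT (' ' :: l) = pvG l := by
  simp [pvT, pvG, pv_split_cons]

theorem pv_splitOn_ne_nil (l : List Char) : l.splitOn ' ' ≠ [] := by
  simpa [List.splitOn] using List.splitOnP_ne_nil (· == ' ') l

theorem pvG_cons_ne (a : Char) (l : List Char) (h : a ≠ ' ') : pvG (a :: l) = 1 + pvT l := by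
  unfold pvG pvT
  rw [pv_split_cons, if_neg h]
  obtain ⟨x, xs, hx⟩ := List.exists_cons_of_ne_nil (pv_splitOn_ne_nil l)
  rw [hx]
  simp
  omega

theorem pvT_cons_ne (a : Char) (l : List Char) (h : a ≠ ' ') : pvT (a :: l) = pvT l := by
  unfold pvT
  rw [pv_split_cons, if_neg h]
  obtain ⟨x, xs, hx⟩ := List.exists_cons_of_ne_nil (pv_splitOn_ne_nil l)
  rw [hx]
  simp

-- normalization of one char
def pvNorm (c : Char) : Char := if pvIsDelim c then ' ' else c

-- Loop invariant: A's fold from state 0 counts all word starts of the normalized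
-- remainder; from state 1 the leading run is already counted.
theorem pv_fold_eq (l : List Char) : ∀ (c : Int),
    ((l.foldl pvStepA (0, c)).2 = c + (pvG (l.map pvNorm) : Int)) ∧
    ((l.foldl pvStepA (1, c)).2 = c + (pvT (l.map pvNorm) : Int)) := by
  induction l with
  | nil => intro c; simp [pvG_nil, pvT_nil]
  | cons a l ih =>
    intro c
    by_cases hd : pvIsDelim a = true
    · have hmem : a ∈ [' ', ',', ';', '\'', '-', '.', '!', '?'] := by
        simpa [pvIsDelim] using hd
      constructor <;>
        simp [pvStepA, hmem, pvNorm, hd, pvG_cons_space, pvT_cons_space, (ih c).1]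
    · have hmem : a ∉ [' ', ',', ';', '\'', '-', '.', '!', '?'] := by
        simpa [pvIsDelim] using hd
      have hne : a ≠ ' ' := by intro h; exact hmem (by simp [h])
      constructor
      · have h2 := (ih (c + 1)).2
        simp [pvStepA, hmem, pvNorm, hd, pvG_cons_ne a _ hne, h2]
        omega
      · have h2 := (ih c).2
        simp [pvStepA, hmem, pvNorm, hd, pvT_cons_ne a _ hne, h2]

-- ===== VERDICT (by name: the statement is the Claim_ definition above) =====
theorem nombre_mots_spec : Claim_equal_nombre_mots := by
  intro M _
  unfold Spec_nombre_mots nombre_mots nombre_mots_alt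
  have h := (pv_fold_eq M.toList 0).1
  simpa [pvG, pvNorm] using h
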